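-- pv_equiv track=rewrite | github.com/luklieb/visualization | Assignment 1/matrix.py | translationMat
-- ===== SOURCE A (Python) =====
-- def identityMat( dim ):
--     result = ()
--     for i in range(0, dim):
--         bla = dim-i-1
--         result = result + ( (0,)*i + (1,) + (0,)*bla, )
--     return result
--
-- def translationMat( t ):
--     matrix = ()
--     length = len(t)
--     matrix = identityMat(length+1)
--     matrix = list(matrix)
--     for i in range(0, length):
--         matrix[i]=list(matrix[i])
--         matrix[i][length] = t[i]
--         matrix[i]=tuple(matrix[i])
--     matrix = tuple(matrix)
--     return matrix
-- ===== SOURCE B (Python) =====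
-- def translationMat(t):
--     n = len(t)
--     return tuple(
--         tuple(t[i] if j == n and i < n else (1 if i == j else 0)
--               for j in range(n + 1))
--         for i in range(n + 1))
-- ===== Notes on version B (the rewrite author's own statement) =====
-- stated objective: simpler
-- what changed: Replaces the build-identity-then-patch-column two-pass construction (identityMat helper plus list/tuple mutation loop) with a single nested comprehension computing each cell directly from its (i,j) position.
import Mathlib
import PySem

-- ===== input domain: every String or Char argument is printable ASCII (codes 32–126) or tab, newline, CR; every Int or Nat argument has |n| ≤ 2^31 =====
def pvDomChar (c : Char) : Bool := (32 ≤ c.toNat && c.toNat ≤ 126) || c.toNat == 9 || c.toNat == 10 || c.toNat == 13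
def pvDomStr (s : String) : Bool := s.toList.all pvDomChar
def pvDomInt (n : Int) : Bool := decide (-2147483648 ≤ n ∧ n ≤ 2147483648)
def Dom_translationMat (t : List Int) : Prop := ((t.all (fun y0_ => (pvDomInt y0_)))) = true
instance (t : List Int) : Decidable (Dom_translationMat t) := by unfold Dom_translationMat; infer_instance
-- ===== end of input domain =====

-- B replaces A's build-identity-then-patch-last-column two-pass construction with a single
-- nested comprehension computing each cell directly from its position (objective: simpler).

-- ===== PORT A =====
def identityMat (dim : Int) : List (List Int) :=
  (PySem.List.pyRange 0 dim 1).foldl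
    (fun result i =>
      let bla := dim - i - 1
      result ++ [List.replicate i.toNat 0 ++ [1] ++ List.replicate bla.toNat 0])
    []

def translationMat (t : List Int) : List (List Int) :=
  let length : Int := t.length
  let matrix := identityMat (length + 1)
  (PySem.List.pyRange 0 length 1).foldl
    (fun matrix i =>
      let row := PySem.List.pyGetD matrix i []
      let row := PySem.List.pySetD row length (PySem.List.pyGetD t i 0)
      PySem.List.pySetD matrix i row)
    matrix

-- ===== PORT B =====
def translationMat_alt (t : List Int) : List (List Int) :=
  let n : Int := t.length
  (PySem.List.pyRange 0 (n + 1) 1).map (fun i =>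
    (PySem.List.pyRange 0 (n + 1) 1).map (fun j =>
      if j = n ∧ i < n then PySem.List.pyGetD t i 0
      else if i = j then 1 else 0))

-- ===== PRECONDITION & SPEC =====
def Spec_translationMat (t : List Int) (out : List (List Int)) : Prop := out = translationMat_alt t
instance (t : List Int) (out : List (List Int)) : Decidable (Spec_translationMat t out) := by unfold Spec_translationMat; infer_instance

-- ===== CLAIM (what is proved, stated in full; the proofs are below) =====
def Claim_equal_translationMat : Prop := ∀ (t : List Int), Dom_translationMat t → Spec_translationMat t (translationMat t)

-- ===== LEMMAS AND PROOFS =====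

/-- The i-th identity row of an (n+1)×(n+1) matrix, in Nat form. -/
def idRowN (n i : Nat) : List Int :=
  List.replicate i 0 ++ [1] ++ List.replicate (n - i) 0

/-- The i-th row after A patches the last column with t[i]. -/
def finRowN (t : List Int) (n i : Nat) : List Int :=
  (idRowN n i).set n (t.getD i 0)

lemma identityMat_eq (n : Nat) :
    identityMat (n : Int) = (List.range n).map (fun i => idRowN (n - 1) i) := by
  unfold identityMat
  rw [PySem.List.pyRange_zero_natCast, List.foldl_map,
    PySem.List.foldl_append_singleton_eq_map, List.nil_append]
  refine List.map_congr_left fun i hi => ?_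
  rw [List.mem_range] at hi
  have h1 : ((i : Int)).toNat = i := by omega
  have h2 : ((n : Int) - i - 1).toNat = n - 1 - i := by omega
  simp only [h1, h2, idRowN]

lemma idRowN_getElem (n i j : Nat) (hj : j < n + 1) (hi : i ≤ n) :
    (idRowN n i)[j]'(by
      simp only [idRowN, List.length_append, List.length_replicate, List.length_cons,
        List.length_nil]
      omega) = if i = j then 1 else 0 := by
  simp only [idRowN, List.getElem_append, List.length_replicate, List.getElem_replicate,
    List.length_append, List.length_cons, List.length_nil]
  split_ifs <;> first
  | rfl
  | omega
  | (simp at *)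

lemma length_idRowN (n i : Nat) (hi : i ≤ n) : (idRowN n i).length = n + 1 := by
  simp only [idRowN, List.length_append, List.length_replicate, List.length_cons,
    List.length_nil]
  omega

/-- Characterisation of A's patch loop after j steps. -/
lemma fold_sets (t : List Int) (n : Nat) (hn : n = t.length) :
    ∀ j, j ≤ n →
      (List.range j).foldl
        (fun m k => m.set k ((m.getD k []).set n (t.getD k 0)))
        ((List.range (n + 1)).map (fun i => idRowN n i))
      = (List.range (n + 1)).map (fun i => if i < j then finRowN t n i else idRowN n i) := by
  intro j hj
  induction j with
  | zero => simp
  | succ j ih =>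
    have hj' : j ≤ n := by omega
    have hr : List.range (j + 1) = List.range j ++ [j] := List.range_succ
    rw [hr, List.foldl_append, ih hj', List.foldl_cons, List.foldl_nil]
    have hlen : j < ((List.range (n+1)).map
        (fun i => if i < j then finRowN t n i else idRowN n i)).length := by
      simp; omega
    have hget : (((List.range (n+1)).map
        (fun i => if i < j then finRowN t n i else idRowN n i)).getD j []) = idRowN n j := by
      rw [List.getD_eq_getElem _ _ hlen]
      simp
    rw [hget]
    apply List.ext_getElem
    · simp
    · intro k hk1 hk2
      simp only [List.getElem_set, List.getElem_map, List.getElem_range] at *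
      simp only [List.length_set, List.length_map, List.length_range] at hk1
      by_cases hkj : j = k
      · subst hkj
        simp [finRowN]
      · simp only [if_neg hkj]
        have : k < j ↔ k < j + 1 := by omega
        simp [this]

lemma translationMat_eq (t : List Int) :
    translationMat t
      = (List.range (t.length + 1)).map
          (fun i => if i < t.length then finRowN t t.length i else idRowN t.length i) := by
  set n := t.length with hn
  unfold translationMat
  dsimp only
  have hcast : (n : Int) + 1 = ((n + 1 : Nat) : Int) := by push_cast; ring
  rw [hcast, identityMat_eq (n + 1)]
  simp only [Nat.add_sub_cancel]
  rw [PySem.List.pyRange_zero_natCast, List.foldl_map]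
  have := fold_sets t n hn n le_rfl
  simpa [Function.comp, PySem.List.pySetD_natCast, PySem.List.pyGetD_natCast] using this

lemma translationMat_alt_eq (t : List Int) :
    translationMat_alt t
      = (List.range (t.length + 1)).map (fun i =>
          (List.range (t.length + 1)).map (fun j =>
            if j = t.length ∧ i < t.length then t.getD i 0 else if i = j then 1 else 0)) := by
  set n := t.length with hn
  unfold translationMat_alt
  dsimp only
  have hcast : (n : Int) + 1 = ((n + 1 : Nat) : Int) := by push_cast; ring
  rw [hcast, PySem.List.pyRange_zero_natCast, List.map_map]
  refine List.map_congr_left fun i _ => ?_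
  simp only [Function.comp, List.map_map]
  refine List.map_congr_left fun j _ => ?_
  simp [← hn, Nat.cast_lt]

lemma rows_eq (t : List Int) (n i : Nat) (hn : n = t.length) (hi : i < n + 1) :
    (List.range (n + 1)).map (fun j =>
        if j = n ∧ i < n then t.getD i 0 else if i = j then 1 else 0)
      = if i < n then finRowN t n i else idRowN n i := by
  have hi' : i ≤ n := by omega
  apply List.ext_getElem
  · simp only [List.length_map, List.length_range]
    split_ifs
    · simp [finRowN, length_idRowN n i hi']
    · rw [length_idRowN n i hi']
  · intro j hj1 hj2
    simp only [List.length_map, List.length_range] at hj1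
    rw [List.getElem_map, List.getElem_range]
    by_cases hin : i < n
    · simp only [if_pos hin] at hj2 ⊢
      simp only [finRowN, List.getElem_set]
      by_cases hjn : n = j
      · subst hjn
        simp [hin]
      · have hjn' : ¬ (j = n ∧ i < n) := by tauto
        rw [if_neg hjn', if_neg hjn,
          idRowN_getElem n i j (by simp [finRowN, length_idRowN n i hi'] at hj2; omega) hi']
    · simp only [if_neg hin] at hj2 ⊢
      have : ¬ (j = n ∧ i < n) := by tauto
      rw [if_neg this,
        idRowN_getElem n i j (by rw [length_idRowN n i hi'] at hj2; omega) hi']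

-- ===== VERDICT (by name: the statement is the Claim_ definition above) =====
theorem translationMat_spec : Claim_equal_translationMat := by
  intro t _
  show translationMat t = translationMat_alt t
  rw [translationMat_eq, translationMat_alt_eq]
  refine List.map_congr_left fun i hi => ?_
  rw [List.mem_range] at hi
  exact (rows_eq t t.length i rfl hi).symm
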